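-- pv_equiv track=rewrite | github.com/wlruys/batchmatch | src/batchmatch/io/export.py | _pyramid_shapes
-- ===== SOURCE A (Python) =====
-- def _pyramid_shapes(
--     base_hw: tuple[int, int],
--     pyramid_levels: int,
-- ) -> tuple[tuple[int, int], ...]:
--     h, w = int(base_hw[0]), int(base_hw[1])
--     shapes: list[tuple[int, int]] = [(h, w)]
--     for _ in range(max(0, int(pyramid_levels))):
--         h //= 2
--         w //= 2
--         if h < 1 or w < 1:
--             break
--         shapes.append((h, w))
--     return tuple(shapes)
-- ===== SOURCE B (Python) =====
-- def _pyramid_shapes(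
--     base_hw: tuple[int, int],
--     pyramid_levels: int,
-- ) -> tuple[tuple[int, int], ...]:
--     h, w = int(base_hw[0]), int(base_hw[1])
--     m = min(h, w)
--     levels = 0 if m < 1 else min(max(0, int(pyramid_levels)), m.bit_length() - 1)
--     return tuple((h >> k, w >> k) for k in range(levels + 1))
-- ===== Notes on version B (the rewrite author's own statement) =====
-- stated objective: alternative
-- what changed: Replaced the iterate-halve-and-break loop by a closed-form level count (bit_length of min(h,w)) plus a direct comprehension of arithmetic right-shifts.
import Mathlib
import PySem

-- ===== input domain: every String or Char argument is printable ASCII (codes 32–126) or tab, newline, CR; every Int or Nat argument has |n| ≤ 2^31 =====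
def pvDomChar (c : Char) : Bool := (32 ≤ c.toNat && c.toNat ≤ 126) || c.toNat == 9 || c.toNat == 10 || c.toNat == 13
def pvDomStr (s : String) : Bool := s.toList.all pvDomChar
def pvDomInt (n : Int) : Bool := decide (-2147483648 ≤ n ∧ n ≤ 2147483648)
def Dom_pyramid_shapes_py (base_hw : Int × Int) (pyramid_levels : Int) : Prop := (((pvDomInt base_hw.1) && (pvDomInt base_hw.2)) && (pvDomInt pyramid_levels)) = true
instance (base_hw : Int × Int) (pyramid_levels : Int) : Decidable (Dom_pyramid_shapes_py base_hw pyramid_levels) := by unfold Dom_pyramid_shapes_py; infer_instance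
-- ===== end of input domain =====

-- B replaces A's iterate-halve-and-break loop with a closed-form level count (via bit_length)
-- and a direct indexed map of arithmetic right-shifts; same cost, different decomposition.

-- ===== PORT A =====
-- the for-loop of A: n remaining iterations, current h w, accumulated shapes
def pyLoopA : Nat → Int → Int → List (Int × Int) → List (Int × Int)
  | 0, _, _, acc => acc
  | n+1, h, w, acc =>
    let h' := PySem.Int.floordiv h 2
    let w' := PySem.Int.floordiv w 2
    if h' < 1 ∨ w' < 1 then acc
    else pyLoopA n h' w' (acc ++ [(h', w')])

def pyramid_shapes_py (base_hw : Int × Int) (pyramid_levels : Int) : List (Int × Int) :=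
  pyLoopA (max 0 pyramid_levels).toNat base_hw.1 base_hw.2 [(base_hw.1, base_hw.2)]

-- ===== PORT B =====
def pyramid_shapes_py_alt (base_hw : Int × Int) (pyramid_levels : Int) : List (Int × Int) :=
  let h := base_hw.1
  let w := base_hw.2
  let m := min h w
  let levels : Int := if m < 1 then 0 else min (max 0 pyramid_levels) ((PySem.Int.bitLength m : Int) - 1)
  (List.range (levels + 1).toNat).map (fun k : Nat => (h >>> k, w >>> k))

-- ===== PRECONDITION & SPEC =====
def Spec_pyramid_shapes_py (base_hw : Int × Int) (pyramid_levels : Int) (out : List (Int × Int)) : Prop := out = pyramid_shapes_py_alt base_hw pyramid_levels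
instance (base_hw : Int × Int) (pyramid_levels : Int) (out : List (Int × Int)) : Decidable (Spec_pyramid_shapes_py base_hw pyramid_levels out) := by unfold Spec_pyramid_shapes_py; infer_instance

-- ===== CLAIM (what is proved, stated in full; the proofs are below) =====
def Claim_equal_pyramid_shapes_py : Prop := ∀ (base_hw : Int × Int) (pyramid_levels : Int), Dom_pyramid_shapes_py base_hw pyramid_levels → Spec_pyramid_shapes_py base_hw pyramid_levels (pyramid_shapes_py base_hw pyramid_levels)

-- ===== LEMMAS AND PROOFS =====

lemma fdiv2_eq_shift (a : Int) : PySem.Int.floordiv a 2 = a >>> (1:Nat) := by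
  rw [PySem.Int.floordiv_eq_ediv_of_pos (by norm_num), Int.shiftRight_eq_div_pow]
  norm_num

lemma fdiv2_lt_one_iff (a : Int) : PySem.Int.floordiv a 2 < 1 ↔ a < 2 := by
  rw [PySem.Int.floordiv_lt_iff_lt_mul (by norm_num)]
  omega

lemma fdiv2_min (h w : Int) :
    PySem.Int.floordiv (min h w) 2 = min (PySem.Int.floordiv h 2) (PySem.Int.floordiv w 2) := by
  simp only [PySem.Int.floordiv_eq_ediv_of_pos (by norm_num : (0:Int) < 2)]
  rcases le_total h w with hc | hc
  · rw [min_eq_left hc, min_eq_left (Int.ediv_le_ediv (by norm_num) hc)]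
  · rw [min_eq_right hc, min_eq_right (Int.ediv_le_ediv (by norm_num) hc)]

lemma bitLength_pos {m : Int} (hm : 0 < m) : 1 ≤ PySem.Int.bitLength m := by
  rw [PySem.Int.bitLength_of_pos hm]
  omega

lemma map_range_succ_cons {A : Type} (f : Nat -> A) (s : Nat) :
    (List.range (s+1)).map f = f 0 :: (List.range s).map (fun k => f (k+1)) := by
  rw [List.range_succ_eq_map, List.map_cons, List.map_map]
  rfl

lemma shift_fdiv2 (a : Int) (k : Nat) :
    (PySem.Int.floordiv a 2) >>> (k+1) = a >>> (k+1+1) := by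
  rw [fdiv2_eq_shift, ← Int.shiftRight_add]
  congr 1
  omega

lemma loop_eq (n : Nat) (h w : Int) (acc : List (Int × Int)) (hh : 1 ≤ h) (hw : 1 ≤ w) :
    pyLoopA n h w acc =
      acc ++ (List.range (min n (PySem.Int.bitLength (min h w) - 1))).map
        (fun k : Nat => (h >>> (k+1), w >>> (k+1))) := by
  induction n generalizing h w acc with
  | zero => simp [pyLoopA]
  | succ n ih =>
    rw [pyLoopA]
    by_cases hb : PySem.Int.floordiv h 2 < 1 ∨ PySem.Int.floordiv w 2 < 1
    · have hm : min h w = 1 := by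
        rcases hb with hb | hb
        · have := (fdiv2_lt_one_iff h).1 hb; omega
        · have := (fdiv2_lt_one_iff w).1 hb; omega
      have hb1 : PySem.Int.bitLength (1 : Int) = 1 := by decide
      rw [if_pos hb]
      simp [hm, hb1]
    · rw [if_neg hb]
      rcases not_or.mp hb with ⟨hb1, hb2⟩
      have hh2 : (2:Int) ≤ h := by have := (fdiv2_lt_one_iff h); omega
      have hw2 : (2:Int) ≤ w := by have := (fdiv2_lt_one_iff w); omega
      have hfh : (1:Int) ≤ PySem.Int.floordiv h 2 := by have := fdiv2_lt_one_iff h; omega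
      have hfw : (1:Int) ≤ PySem.Int.floordiv w 2 := by have := fdiv2_lt_one_iff w; omega
      rw [ih _ _ _ hfh hfw]
      have hmin : min (PySem.Int.floordiv h 2) (PySem.Int.floordiv w 2)
          = PySem.Int.floordiv (min h w) 2 := (fdiv2_min h w).symm
      have hbl : PySem.Int.bitLength (min h w)
          = PySem.Int.bitLength (PySem.Int.floordiv (min h w) 2) + 1 :=
        PySem.Int.bitLength_of_pos (by omega)
      have hblp : 1 ≤ PySem.Int.bitLength (PySem.Int.floordiv (min h w) 2) :=
        bitLength_pos (by rw [fdiv2_min]; omega)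
      rw [hmin]
      have hsucc : min (n+1) (PySem.Int.bitLength (min h w) - 1)
          = min n (PySem.Int.bitLength (PySem.Int.floordiv (min h w) 2) - 1) + 1 := by omega
      rw [hsucc, map_range_succ_cons]
      simp only [List.append_assoc, List.singleton_append]
      congr 1
      congr 1
      · exact congrArg₂ Prod.mk (by rw [fdiv2_eq_shift]) (by rw [fdiv2_eq_shift])
      · apply List.map_congr_left
        intro k _
        rw [shift_fdiv2, shift_fdiv2]

-- ===== VERDICT (by name: the statement is the Claim_ definition above) =====
theorem pyramid_shapes_py_spec : Claim_equal_pyramid_shapes_py := by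
  unfold Claim_equal_pyramid_shapes_py
  rintro ⟨h, w⟩ L _
  unfold Spec_pyramid_shapes_py pyramid_shapes_py pyramid_shapes_py_alt
  simp only
  by_cases hm : min h w < 1
  · rw [if_pos hm]
    have hB : (List.range ((0:Int) + 1).toNat).map (fun k : Nat => ((h:Int) >>> k, (w:Int) >>> k))
        = [(h, w)] := by simp
    rw [hB]
    cases hn : (max 0 L).toNat with
    | zero => rw [pyLoopA]
    | succ n =>
      rw [pyLoopA]
      have hbrk : PySem.Int.floordiv h 2 < 1 ∨ PySem.Int.floordiv w 2 < 1 := by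
        rcases lt_or_ge h 1 with hc | hc
        · exact Or.inl ((fdiv2_lt_one_iff h).2 (by omega))
        · exact Or.inr ((fdiv2_lt_one_iff w).2 (by omega))
      rw [if_pos hbrk]
  · rw [if_neg hm]
    rw [loop_eq _ h w _ (by omega) (by omega)]
    have hbl : 1 ≤ PySem.Int.bitLength (min h w) := bitLength_pos (by omega)
    have hcnt : (min (max 0 L) ((PySem.Int.bitLength (min h w) : Int) - 1) + 1).toNat
        = min (max 0 L).toNat (PySem.Int.bitLength (min h w) - 1) + 1 := by omega
    rw [hcnt, map_range_succ_cons]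
    simp
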